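-- pv_equiv track=rewrite | github.com/v-t-9/PythonPuzzles | ex46.py | minValueIndex
-- ===== SOURCE A (Python) =====
-- def even(l):
--     even = []
--     for i in l:
--         if i % 2 == 0:
--             even.append(i)
--     return even
--
-- def minValueIndex(l):
--     li = even(l)
--     if li == []:
--         return []
--     else:
--         mi = min(li)
--         pos = 0
--         for i in range(len(l)):
--             if l[i] ==mi:
--                 pos = i
--         return [mi, pos]
-- ===== SOURCE B (Python) =====
-- def minValueIndex(l):
--     mi = None
--     pos = 0
--     for i, x in enumerate(l):
--         if x % 2 == 0:
--             if mi is None or x < mi: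
--                 mi = x
--                 pos = i
--             elif x == mi:
--                 pos = i
--     if mi is None:
--         return []
--     return [mi, pos]
-- ===== Notes on version B (the rewrite author's own statement) =====
-- stated objective: alternative
-- what changed: Replaces A's three sequential passes (build even-list, min() over it, rescan the whole list for the last matching index) by one fused scan keeping the current minimum even value and its last index; measured cost is comparable.
import Mathlib
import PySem

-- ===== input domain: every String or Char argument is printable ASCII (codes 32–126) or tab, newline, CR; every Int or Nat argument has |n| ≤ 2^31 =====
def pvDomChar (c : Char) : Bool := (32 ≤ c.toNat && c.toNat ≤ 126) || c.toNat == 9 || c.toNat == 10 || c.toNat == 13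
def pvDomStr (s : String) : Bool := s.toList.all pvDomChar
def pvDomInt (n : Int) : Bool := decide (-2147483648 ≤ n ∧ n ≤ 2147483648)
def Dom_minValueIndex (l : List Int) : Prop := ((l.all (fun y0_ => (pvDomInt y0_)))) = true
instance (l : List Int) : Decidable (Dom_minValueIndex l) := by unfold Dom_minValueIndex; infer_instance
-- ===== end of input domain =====

-- B replaces A's three passes (build even-list, min() over it, rescan for the last index) by one fused scan over enumerate(l); same return value on every input (same cost).

-- ===== PORT A =====
def pyEven (l : List Int) : List Int :=
  l.foldl (fun acc i => if PySem.Int.mod i 2 == 0 then acc ++ [i] else acc) []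

def minValueIndex (l : List Int) : List Int :=
  let li := pyEven l
  if li = [] then []
  else
    match PySem.List.min? li (fun x => x) with
    | none => []
    | some mi =>
      let pos := (PySem.List.pyRange 0 (l.length : Int) 1).foldl
        (fun pos i => if PySem.List.pyGetD l i 0 = mi then i else pos) 0
      [mi, pos]

-- ===== PORT B =====
def altStep (s : Option Int × Int) (p : Int × Int) : Option Int × Int :=
  if PySem.Int.mod p.2 2 == 0 then
    match s.1 with
    | none => (some p.2, p.1)
    | some m => if p.2 < m then (some p.2, p.1) else if p.2 = m then (some m, p.1) else s
  else s

def minValueIndex_alt (l : List Int) : List Int :=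
  let s := (PySem.List.enumerate l 0).foldl altStep ((none : Option Int), (0 : Int))
  match s.1 with
  | none => []
  | some mi => [mi, s.2]

-- ===== PRECONDITION & SPEC =====
def Spec_minValueIndex (l : List Int) (out : List Int) : Prop := out = minValueIndex_alt l
instance (l : List Int) (out : List Int) : Decidable (Spec_minValueIndex l out) := by unfold Spec_minValueIndex; infer_instance

-- ===== CLAIM (what is proved, stated in full; the proofs are below) =====
def Claim_equal_minValueIndex : Prop := ∀ (l : List Int), Dom_minValueIndex l → Spec_minValueIndex l (minValueIndex l)

-- ===== LEMMAS AND PROOFS =====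

/-- A's final `pos` loop, as a function of the list and the minimum. -/
def posA (l : List Int) (m : Int) : Int :=
  (PySem.List.pyRange 0 (l.length : Int) 1).foldl
    (fun pos i => if PySem.List.pyGetD l i 0 = m then i else pos) 0

theorem pyEven_eq_filter (l : List Int) :
    pyEven l = l.filter (fun i => PySem.Int.mod i 2 == 0) := by
  simpa [pyEven] using
    PySem.List.foldl_append_if_eq_filter (fun i => PySem.Int.mod i 2 == 0) l []

theorem min?_snoc (li : List Int) (x : Int) :
    PySem.List.min? (li ++ [x]) (fun y => y) =
      some (match PySem.List.min? li (fun y => y) with | none => x | some m => min m x) := by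
  cases li with
  | nil =>
      have h0 : PySem.List.min? ([] : List Int) (fun y => y) = none :=
        (PySem.List.min?_eq_none_iff _ _).mpr rfl
      rw [List.nil_append, PySem.List.min?_id_cons, h0]
      rfl
  | cons h t =>
      rw [List.cons_append, PySem.List.min?_id_cons, PySem.List.min?_id_cons,
        List.foldl_append, List.foldl_cons, List.foldl_nil]

theorem posA_snoc (l : List Int) (x m : Int) :
    posA (l ++ [x]) m = if x = m then (l.length : Int) else posA l m := by
  unfold posA
  have hlen : (((l ++ [x]).length : Nat) : Int) = (l.length : Int) + 1 := by
    simp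
  rw [hlen, PySem.List.pyRange_one_succ_right (by positivity), List.foldl_append]
  have hpre :
      (PySem.List.pyRange 0 (l.length : Int) 1).foldl
        (fun pos i => if PySem.List.pyGetD (l ++ [x]) i 0 = m then i else pos) 0 =
      (PySem.List.pyRange 0 (l.length : Int) 1).foldl
        (fun pos i => if PySem.List.pyGetD l i 0 = m then i else pos) 0 := by
    apply PySem.List.foldl_congr_mem
    intro acc i hi
    rw [PySem.List.mem_pyRange_one] at hi
    have h3 : i.toNat < l.length := by omega
    rw [PySem.List.pyGetD_eq_getElem (l ++ [x]) 0 hi.1 (by simp; omega),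
      PySem.List.pyGetD_eq_getElem l 0 hi.1 (by simpa using hi.2),
      List.getElem_append_left h3]
  rw [hpre]
  have hlast : PySem.List.pyGetD (l ++ [x]) (l.length : Int) 0 = x := by
    rw [PySem.List.pyGetD_eq_getElem (l ++ [x]) 0 (by positivity) (by simp)]
    simp
  simp only [List.foldl_cons, List.foldl_nil, hlast]

/-- Characterisation of B's fused scan state by A's three passes. -/
theorem state_char (l : List Int) :
    (PySem.List.enumerate l 0).foldl altStep ((none : Option Int), (0 : Int)) =
      match PySem.List.min? (l.filter (fun i => PySem.Int.mod i 2 == 0)) (fun x => x) with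
      | none => ((none : Option Int), (0 : Int))
      | some m => (some m, posA l m) := by
  induction l using List.reverseRecOn with
  | nil =>
      rw [show PySem.List.min? (List.filter (fun i => PySem.Int.mod i 2 == 0) []) (fun x => x)
        = none from (PySem.List.min?_eq_none_iff _ _).mpr rfl]
      rfl
  | append_singleton l x ih =>
      rw [PySem.List.enumerate_append, List.foldl_append, ih]
      have henum : PySem.List.enumerate [x] ((0 : Int) + (l.length : Nat)) =
          [((l.length : Int), x)] := by
        rw [PySem.List.enumerate_cons, PySem.List.enumerate_nil]
        norm_num
      rw [henum, List.foldl_cons, List.foldl_nil]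
      by_cases hx : (PySem.Int.mod x 2 == 0) = true
      · -- x is even
        have hfil : (l ++ [x]).filter (fun i => PySem.Int.mod i 2 == 0)
            = l.filter (fun i => PySem.Int.mod i 2 == 0) ++ [x] := by
          rw [List.filter_append]
          simp only [List.filter_cons, List.filter_nil]
          rw [if_pos hx]
        rw [hfil, min?_snoc]
        cases hmin : PySem.List.min? (l.filter (fun i => PySem.Int.mod i 2 == 0)) (fun y => y) with
        | none =>
            show altStep (none, 0) ((l.length : Int), x) = (some x, posA (l ++ [x]) x)
            simp only [altStep]
            rw [if_pos hx, posA_snoc, if_pos rfl]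
        | some m =>
            show altStep (some m, posA l m) ((l.length : Int), x)
              = (some (min m x), posA (l ++ [x]) (min m x))
            simp only [altStep]
            rw [if_pos hx]
            by_cases hlt : x < m
            · have hmx : min m x = x := by omega
              rw [if_pos hlt, hmx, posA_snoc, if_pos rfl]
            · have hmx : min m x = m := by omega
              rw [if_neg hlt, hmx, posA_snoc]
              by_cases heq : x = m
              · rw [if_pos heq, if_pos heq]
              · rw [if_neg heq, if_neg heq]
      · -- x is odd: nothing changes
        have hfil : (l ++ [x]).filter (fun i => PySem.Int.mod i 2 == 0)
            = l.filter (fun i => PySem.Int.mod i 2 == 0) := by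
          rw [List.filter_append]
          simp only [List.filter_cons, List.filter_nil]
          rw [if_neg hx, List.append_nil]
        rw [hfil]
        cases hmin : PySem.List.min? (l.filter (fun i => PySem.Int.mod i 2 == 0)) (fun y => y) with
        | none =>
            show altStep (none, 0) ((l.length : Int), x) = (none, 0)
            simp only [altStep]
            rw [if_neg hx]
        | some m =>
            have hme : (PySem.Int.mod m 2 == 0) = true :=
              (List.mem_filter.mp (PySem.List.min?_mem hmin)).2
            have hne : x ≠ m := by
              intro h; rw [h] at hx; exact hx hme
            show altStep (some m, posA l m) ((l.length : Int), x) = (some m, posA (l ++ [x]) m)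
            simp only [altStep]
            rw [if_neg hx, posA_snoc, if_neg hne]

theorem main_eq (l : List Int) : minValueIndex l = minValueIndex_alt l := by
  unfold minValueIndex minValueIndex_alt
  rw [state_char, pyEven_eq_filter]
  cases hmin : PySem.List.min? (l.filter (fun i => PySem.Int.mod i 2 == 0)) (fun y => y) with
  | none =>
      have hnil : l.filter (fun i => PySem.Int.mod i 2 == 0) = [] :=
        (PySem.List.min?_eq_none_iff _ _).mp hmin
      rw [hnil]
      rfl
  | some m =>
      have hnil : l.filter (fun i => PySem.Int.mod i 2 == 0) ≠ [] := by
        intro h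
        rw [(PySem.List.min?_eq_none_iff _ _).mpr h] at hmin
        simp at hmin
      show (if l.filter (fun i => PySem.Int.mod i 2 == 0) = [] then []
        else
          match PySem.List.min? (l.filter (fun i => PySem.Int.mod i 2 == 0)) (fun x => x) with
          | none => []
          | some mi =>
            [mi, (PySem.List.pyRange 0 (l.length : Int) 1).foldl
              (fun pos i => if PySem.List.pyGetD l i 0 = mi then i else pos) 0])
        = [m, posA l m]
      rw [if_neg hnil, hmin]
      rfl

-- ===== VERDICT (by name: the statement is the Claim_ definition above) =====
theorem minValueIndex_spec : Claim_equal_minValueIndex := by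
  intro l _
  unfold Spec_minValueIndex
  exact main_eq l
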